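-- pv_equiv track=rewrite | github.com/qiujihao19/LongVideo-R1 | data/utils.py | get_covered_ids
-- ===== SOURCE A (Python) =====
-- def get_covered_ids(std_id, end_id, width):
--     covered = []
--     for h in range(std_id[0], end_id[0]+1):
--         med_start = std_id[1] if h == std_id[0] else 1
--         med_end = end_id[1] if h == end_id[0] else width
--         for m in range(med_start, med_end+1):
--             low_start = std_id[2] if (h == std_id[0] and m == std_id[1]) else 1
--             low_end = end_id[2] if (h == end_id[0] and m == end_id[1]) else width
--             for l in range(low_start, low_end+1):
--                 covered.append((h, m, l))
--     return covered
-- ===== SOURCE B (Python) =====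
-- def get_covered_ids(std_id, end_id, width):
--     h0, m0, l0 = std_id
--     h1, m1, l1 = end_id
--
--     def row(h, m, a, b):
--         return [(h, m, l) for l in range(a, b + 1)]
--
--     def seg(h, ma, mb, la, lb):
--         # rows m = ma..mb; the first row starts at la, the last ends at lb,
--         # interior rows span the full 1..width
--         if ma > mb:
--             return []
--         if ma == mb:
--             return row(h, ma, la, lb)
--         return (row(h, ma, la, width)
--                 + [t for m in range(ma + 1, mb) for t in row(h, m, 1, width)]
--                 + row(h, mb, 1, lb))
--
--     if h0 > h1:
--         return []
--     if h0 == h1: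
--         return seg(h0, m0, m1, l0, l1)
--     return (seg(h0, m0, width, l0, width)
--             + [t for h in range(h0 + 1, h1) for t in seg(h, 1, width, 1, width)]
--             + seg(h1, 1, m1, 1, l1))
-- ===== Notes on version B (the rewrite author's own statement) =====
-- stated objective: alternative
-- what changed: Replaces the three boundary-conditioned nested loops by an explicit first/middle/last segment construction: the result is built as a concatenation of closed row/segment blocks, with per-iteration boundary conditionals eliminated.
import Mathlib
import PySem

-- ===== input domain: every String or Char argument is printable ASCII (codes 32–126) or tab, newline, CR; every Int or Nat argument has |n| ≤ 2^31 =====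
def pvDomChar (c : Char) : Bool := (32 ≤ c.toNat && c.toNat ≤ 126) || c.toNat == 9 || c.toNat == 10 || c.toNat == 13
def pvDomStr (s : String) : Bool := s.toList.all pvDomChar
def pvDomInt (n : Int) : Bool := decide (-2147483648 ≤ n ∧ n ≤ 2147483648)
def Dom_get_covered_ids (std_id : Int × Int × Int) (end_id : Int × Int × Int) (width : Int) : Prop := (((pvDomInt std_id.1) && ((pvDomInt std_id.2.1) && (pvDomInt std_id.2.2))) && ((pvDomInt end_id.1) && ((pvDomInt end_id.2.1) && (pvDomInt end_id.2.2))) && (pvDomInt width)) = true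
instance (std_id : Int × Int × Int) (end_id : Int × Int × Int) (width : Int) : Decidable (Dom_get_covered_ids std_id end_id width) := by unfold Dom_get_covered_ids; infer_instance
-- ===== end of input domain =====

-- B rebuilds the covered-id list as an explicit first/middle/last concatenation of closed segments
-- instead of A's boundary-conditioned triple loop (objective: alternative; equal cost).


-- ===== PORT A =====
def get_covered_ids (std_id : Int × Int × Int) (end_id : Int × Int × Int) (width : Int) : List (Int × Int × Int) :=
  (PySem.List.pyRange std_id.1 (end_id.1 + 1) 1).foldl (fun covered h =>
    let med_start : Int := if h = std_id.1 then std_id.2.1 else 1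
    let med_end : Int := if h = end_id.1 then end_id.2.1 else width
    (PySem.List.pyRange med_start (med_end + 1) 1).foldl (fun covered m =>
      let low_start : Int := if h = std_id.1 ∧ m = std_id.2.1 then std_id.2.2 else 1
      let low_end : Int := if h = end_id.1 ∧ m = end_id.2.1 then end_id.2.2 else width
      (PySem.List.pyRange low_start (low_end + 1) 1).foldl (fun covered l =>
        covered ++ [(h, m, l)]) covered) covered) []

-- ===== PORT B =====
-- row h m a b = [(h, m, l) for l in range(a, b + 1)]
def pvRow (h m a b : Int) : List (Int × Int × Int) :=
  (PySem.List.pyRange a (b + 1) 1).map (fun l => (h, m, l))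

-- seg: rows m = ma..mb; first row starts at la, last row ends at lb, interior rows are full 1..width
def pvSeg (width h ma mb la lb : Int) : List (Int × Int × Int) :=
  if ma > mb then []
  else if ma = mb then pvRow h ma la lb
  else pvRow h ma la width
       ++ (PySem.List.pyRange (ma + 1) mb 1).flatMap (fun m => pvRow h m 1 width)
       ++ pvRow h mb 1 lb

def get_covered_ids_alt (std_id : Int × Int × Int) (end_id : Int × Int × Int) (width : Int) : List (Int × Int × Int) :=
  let h0 := std_id.1; let m0 := std_id.2.1; let l0 := std_id.2.2
  let h1 := end_id.1; let m1 := end_id.2.1; let l1 := end_id.2.2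
  if h0 > h1 then []
  else if h0 = h1 then pvSeg width h0 m0 m1 l0 l1
  else pvSeg width h0 m0 width l0 width
       ++ (PySem.List.pyRange (h0 + 1) h1 1).flatMap (fun h => pvSeg width h 1 width 1 width)
       ++ pvSeg width h1 1 m1 1 l1

-- ===== PRECONDITION & SPEC =====
def Spec_get_covered_ids (std_id : Int × Int × Int) (end_id : Int × Int × Int) (width : Int) (out : List (Int × Int × Int)) : Prop := out = get_covered_ids_alt std_id end_id width
instance (std_id : Int × Int × Int) (end_id : Int × Int × Int) (width : Int) (out : List (Int × Int × Int)) : Decidable (Spec_get_covered_ids std_id end_id width out) := by unfold Spec_get_covered_ids; infer_instance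

-- ===== CLAIM (what is proved, stated in full; the proofs are below) =====
def Claim_equal_get_covered_ids : Prop := ∀ (std_id : Int × Int × Int) (end_id : Int × Int × Int) (width : Int), Dom_get_covered_ids std_id end_id width → Spec_get_covered_ids std_id end_id width (get_covered_ids std_id end_id width)

-- ===== LEMMAS AND PROOFS =====

theorem pvFlatMap_congr_mem {α β : Type} {l : List α} {f g : α → List β}
    (h : ∀ x ∈ l, f x = g x) : l.flatMap f = l.flatMap g := by
  induction l with
  | nil => rfl
  | cons a t ih =>
      simp only [List.flatMap_cons]
      rw [h a (List.mem_cons_self), ih (fun x hx => h x (List.mem_cons_of_mem a hx))]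

-- A's middle+inner loops for a fixed h, written as a flatMap of rows
def pvAinner (std_id : Int × Int × Int) (end_id : Int × Int × Int) (width h : Int) : List (Int × Int × Int) :=
  (PySem.List.pyRange (if h = std_id.1 then std_id.2.1 else 1)
      ((if h = end_id.1 then end_id.2.1 else width) + 1) 1).flatMap (fun m =>
    pvRow h m (if h = std_id.1 ∧ m = std_id.2.1 then std_id.2.2 else 1)
              (if h = end_id.1 ∧ m = end_id.2.1 then end_id.2.2 else width))

theorem pvA_flat (std_id end_id : Int × Int × Int) (width : Int) :
    get_covered_ids std_id end_id width
      = (PySem.List.pyRange std_id.1 (end_id.1 + 1) 1).flatMap (pvAinner std_id end_id width) := by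
  simp only [get_covered_ids,
    PySem.List.foldl_append_singleton_eq_map, PySem.List.foldl_append_eq_flatMap,
    List.nil_append]
  rfl

theorem pvSeg_eq (w h ma mb la lb : Int) :
    (PySem.List.pyRange ma (mb + 1) 1).flatMap (fun m =>
        pvRow h m (if m = ma then la else 1) (if m = mb then lb else w))
      = pvSeg w h ma mb la lb := by
  rcases lt_trichotomy ma mb with hlt | heq | hgt
  · rw [PySem.List.pyRange_one_cons (by omega : ma < mb + 1),
       PySem.List.pyRange_one_succ_right (by omega : ma + 1 ≤ mb)]
    simp only [List.flatMap_cons, List.flatMap_append, List.flatMap_nil, List.append_nil]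
    rw [pvFlatMap_congr_mem (g := fun m => pvRow h m 1 w)
        (fun m hm => by
          rw [PySem.List.mem_pyRange_one] at hm
          rw [if_neg (by omega), if_neg (by omega)])]
    have e1 : ¬ ma > mb := by omega
    have e2 : ¬ ma = mb := by omega
    have e3 : ¬ mb = ma := by omega
    simp [pvSeg, e1, e2, e3, List.append_assoc]
  · subst heq
    rw [PySem.List.pyRange_one_singleton]
    simp [pvSeg]
  · rw [PySem.List.pyRange_one_eq_nil (by omega : mb + 1 ≤ ma)]
    simp [pvSeg, hgt]

-- ===== VERDICT (by name: the statement is the Claim_ definition above) =====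
theorem get_covered_ids_spec : Claim_equal_get_covered_ids := by
  intro std_id end_id width _
  obtain ⟨h0, m0, l0⟩ := std_id
  obtain ⟨h1, m1, l1⟩ := end_id
  unfold Spec_get_covered_ids
  rw [pvA_flat]
  rcases lt_trichotomy h0 h1 with hlt | heq | hgt
  · rw [show PySem.List.pyRange h0 (h1 + 1) 1
          = h0 :: (PySem.List.pyRange (h0 + 1) h1 1 ++ [h1]) by
        rw [PySem.List.pyRange_one_cons (by omega : h0 < h1 + 1),
           PySem.List.pyRange_one_succ_right (by omega : h0 + 1 ≤ h1)]]
    simp only [List.flatMap_cons, List.flatMap_append, List.flatMap_nil, List.append_nil]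
    have hfirst : pvAinner (h0, m0, l0) (h1, m1, l1) width h0 = pvSeg width h0 m0 width l0 width := by
      have hne : ¬ h0 = h1 := by omega
      simp [pvAinner, hne]
      rw [← pvSeg_eq width h0 m0 width l0 width]
      simp only [ite_self]
    have hmid : (PySem.List.pyRange (h0 + 1) h1 1).flatMap (pvAinner (h0, m0, l0) (h1, m1, l1) width)
        = (PySem.List.pyRange (h0 + 1) h1 1).flatMap (fun h => pvSeg width h 1 width 1 width) := by
      refine pvFlatMap_congr_mem (fun h hm => ?_)
      rw [PySem.List.mem_pyRange_one] at hm
      have hne0 : ¬ h = h0 := by omega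
      have hne1 : ¬ h = h1 := by omega
      simp [pvAinner, hne0, hne1]
      rw [← pvSeg_eq width h 1 width 1 width]
      simp only [ite_self]
    have hlast : pvAinner (h0, m0, l0) (h1, m1, l1) width h1 = pvSeg width h1 1 m1 1 l1 := by
      have hne : ¬ h1 = h0 := by omega
      simp [pvAinner, hne]
      rw [← pvSeg_eq width h1 1 m1 1 l1]
      simp only [ite_self]
    rw [hfirst, hmid, hlast]
    simp only [get_covered_ids_alt, if_neg (by omega : ¬ h0 > h1), if_neg (by omega : ¬ h0 = h1)]
    simp [List.append_assoc]
  · subst heq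
    rw [PySem.List.pyRange_one_singleton]
    simp only [List.flatMap_cons, List.flatMap_nil, List.append_nil]
    simp [pvAinner]
    rw [pvSeg_eq]
    simp [get_covered_ids_alt]
  · rw [PySem.List.pyRange_one_eq_nil (by omega : h1 + 1 ≤ h0)]
    simp only [List.flatMap_nil]
    simp only [get_covered_ids_alt, if_pos (by omega : h0 > h1)]
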